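-- pv_equiv track=rewrite | github.com/FaikEkin/CSE101-Proje | seating.py | render_seat_map
-- ===== SOURCE A (Python) =====
-- def render_seat_map(seat_map: dict) -> str:
--     output = "\n   " + " ".join(f"{i:2}" for i in range(1, 13)) + "\n"
--     current_row = ""
--
--     for seat_code, data in seat_map.items():
--         row = seat_code[0]
--         if row != current_row:
--             if current_row != "": output += "\n"
--             output += f"{row}  "
--             current_row = row
--
--         symbol = "○" if data["status"] == "available" else "●"
--         output += f"{symbol}  "
--
--     legend = "\n\nLegend: ○ Available, ● Reserved/Sold"
--     return output + legend
-- ===== SOURCE B (Python) =====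
-- def render_seat_map(seat_map: dict) -> str:
--     header = "\n   " + " ".join(f"{i:2}" for i in range(1, 13)) + "\n"
--     legend = "\n\nLegend: ○ Available, ● Reserved/Sold"
--     items = list(seat_map.items())
--
--     def rows(items):
--         # render the leading run of seats sharing a row letter, then recurse on the rest
--         if not items:
--             return ""
--         r = items[0][0][0]
--         n = 1
--         while n < len(items) and items[n][0][0] == r:
--             n += 1
--         row = r + "  " + "".join(
--             ("○" if d["status"] == "available" else "●") + "  " for _, d in items[:n])
--         rest = rows(items[n:])
--         return row if rest == "" else row + "\n" + rest
--
--     return header + rows(items) + legend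
-- ===== Notes on version B (the rewrite author's own statement) =====
-- stated objective: alternative
-- what changed: A's single fold threading a (output, current_row) state machine is replaced by a grouping decomposition: split the items into maximal consecutive runs sharing a row letter, render each run as one row string, and join the rows with newlines.
import Mathlib
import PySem

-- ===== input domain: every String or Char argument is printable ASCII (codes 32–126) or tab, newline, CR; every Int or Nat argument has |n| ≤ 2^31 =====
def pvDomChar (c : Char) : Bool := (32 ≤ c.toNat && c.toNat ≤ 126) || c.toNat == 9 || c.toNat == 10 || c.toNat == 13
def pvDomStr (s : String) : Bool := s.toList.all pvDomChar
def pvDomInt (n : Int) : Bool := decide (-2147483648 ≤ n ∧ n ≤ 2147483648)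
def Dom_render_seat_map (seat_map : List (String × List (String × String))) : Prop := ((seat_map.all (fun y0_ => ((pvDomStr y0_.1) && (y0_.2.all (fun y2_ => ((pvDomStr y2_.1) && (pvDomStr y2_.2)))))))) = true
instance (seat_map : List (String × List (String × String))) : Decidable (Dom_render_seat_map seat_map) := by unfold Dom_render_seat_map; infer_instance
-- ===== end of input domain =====

-- B replaces A's `current_row` state machine (one fold threading output+state) by a
-- grouping decomposition: split the items into maximal leading runs of equal row letter,
-- render each run as one row string, and join the rows with newlines (objective: alternative).

-- f"{i:2}": exact for 0 ≤ i ≤ 99 (here only 1..12 is used)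
def pvFmt2 (i : Int) : String :=
  if i < 10 then " " ++ PySem.Int.toStr i else PySem.Int.toStr i

-- the fixed header "\n   " + " ".join(f"{i:2}" for i in range(1,13)) + "\n" (identical in A and B)
def pvHeader : String :=
  "\n   " ++ PySem.Str.join " " ((PySem.List.pyRange 1 13 1).map pvFmt2) ++ "\n"

-- '○' if data["status"] == "available" else '●' (identical expression in A and B)
def pvStatusSym (data : List (String × String)) : String :=
  if (PySem.Dict.get? (PySem.Dict.mk data) "status").getD "" = "available" then "○" else "●"

-- ===== PORT A =====
-- seat_code[0] as the 1-character Python string; "" only when seat_code = "" (A raises IndexError there, outside Pre_)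
def pvRowOf (code : String) : String :=
  match PySem.Str.pyGet? code 0 with
  | some c => String.ofList [c]
  | none => ""

-- loop body of A: state = (output, current_row)
def pvStepA (st : String × String) (kv : String × List (String × String)) : String × String :=
  let row := pvRowOf kv.1
  let st :=
    if row ≠ st.2 then
      ((if st.2 ≠ "" then st.1 ++ "\n" else st.1) ++ row ++ "  ", row)
    else st
  (st.1 ++ pvStatusSym kv.2 ++ "  ", st.2)

def render_seat_map (seat_map : List (String × List (String × String))) : String :=
  (seat_map.foldl pvStepA (pvHeader, "")).1 ++ "\n\nLegend: ○ Available, ● Reserved/Sold"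

-- ===== PORT B =====
-- the while loop of Source B: how many further leading items share row letter r
def pvRunLen (r : Char) : List (String × List (String × String)) → Nat
  | [] => 0
  | kv :: rest => if PySem.Str.pyGet? kv.1 0 = some r then pvRunLen r rest + 1 else 0

-- rows(items) of Source B: render the leading run as one row, recurse on the rest
def pvRows : List (String × List (String × String)) → String
  | [] => ""
  | kv :: rest =>
    let r : Char := (PySem.Str.pyGet? kv.1 0).getD ' '
    let n := pvRunLen r rest
    let row := String.ofList [r] ++ "  " ++
      PySem.Str.join "" (((kv :: rest).take (n + 1)).map (fun kd => pvStatusSym kd.2 ++ "  "))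
    let rest' := pvRows (rest.drop n)
    if rest' = "" then row else row ++ "\n" ++ rest'
termination_by items => items.length
decreasing_by simp

def render_seat_map_alt (seat_map : List (String × List (String × String))) : String :=
  pvHeader ++ pvRows seat_map ++ "\n\nLegend: ○ Available, ● Reserved/Sold"

-- ===== PRECONDITION & SPEC =====
-- Pre_ excludes (a) empty seat codes and seats whose data lacks a "status" key — A raises
-- IndexError/KeyError there (and B raises too) — and (b) association lists with duplicate
-- outer or inner keys, which do not represent a Python dict input at all.
def Pre_render_seat_map (seat_map : List (String × List (String × String))) : Prop :=
  (∀ kv ∈ seat_map, kv.1 ≠ "" ∧ "status" ∈ kv.2.map Prod.fst ∧ (kv.2.map Prod.fst).Nodup) ∧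
  (seat_map.map Prod.fst).Nodup
instance (seat_map : List (String × List (String × String))) : Decidable (Pre_render_seat_map seat_map) := by unfold Pre_render_seat_map; infer_instance

def pvWitness_render_seat_map : (List (String × List (String × String))) :=
  [("A1", [("status", "available")]), ("A2", [("status", "sold")]), ("B1", [("status", "available")])]

def Spec_render_seat_map (seat_map : List (String × List (String × String))) (out : String) : Prop := out = render_seat_map_alt seat_map
instance (seat_map : List (String × List (String × String))) (out : String) : Decidable (Spec_render_seat_map seat_map out) := by unfold Spec_render_seat_map; infer_instance

-- ===== CLAIM (what is proved, stated in full; the proofs are below) =====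
def Claim_equal_render_seat_map : Prop := ∀ (seat_map : List (String × List (String × String))), Dom_render_seat_map seat_map → Pre_render_seat_map seat_map → Spec_render_seat_map seat_map (render_seat_map seat_map)

-- ===== LEMMAS AND PROOFS =====

theorem pvGet0 (code : String) : PySem.Str.pyGet? code 0 = code.toList[0]? := by
  exact_mod_cast PySem.Str.pyGet?_natCast code 0

theorem pvJoinE (x : String) (xs : List String) :
    PySem.Str.join "" (x :: xs) = x ++ PySem.Str.join "" xs := by
  cases xs with
  | nil => rw [String.ext_iff]; simp [PySem.Str.join, PySem.Chars.join_singleton, PySem.Chars.join_nil]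
  | cons y ys => rw [String.ext_iff]; simp [PySem.Str.join, PySem.Chars.join_cons_cons]

theorem pvRowOf_eq (code : String) (c : Char) (h : PySem.Str.pyGet? code 0 = some c) :
    pvRowOf code = String.ofList [c] := by simp only [pvRowOf, h]

theorem pvRowOf_ne (code : String) (c : Char) (h : PySem.Str.pyGet? code 0 ≠ some c) :
    pvRowOf code ≠ String.ofList [c] := by
  unfold pvRowOf
  cases hg : PySem.Str.pyGet? code 0 with
  | none => intro he; rw [String.ext_iff] at he; simp at he
  | some c' =>
      intro he; rw [String.ext_iff] at he; simp at he
      exact h (by rw [hg, he])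

theorem pvRowOf_ne_nil (code : String) (h : code ≠ "") : pvRowOf code ≠ "" := by
  have ht : code.toList ≠ [] := by
    intro he; apply h; rw [String.ext_iff, he]; rfl
  cases hl : code.toList with
  | nil => exact absurd hl ht
  | cons a l =>
      have : PySem.Str.pyGet? code 0 = some a := by rw [pvGet0, hl]; rfl
      rw [pvRowOf_eq code a this]
      intro he; rw [String.ext_iff] at he; simp at he

theorem pvTake_run (r : Char) (rest : List (String × List (String × String))) :
    ∀ kv ∈ rest.take (pvRunLen r rest), PySem.Str.pyGet? kv.1 0 = some r := by
  induction rest with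
  | nil => simp [pvRunLen]
  | cons kv' rest' ih =>
      by_cases h : PySem.Str.pyGet? kv'.1 0 = some r
      · simp only [pvRunLen, if_pos h, List.take_succ_cons]
        intro kv hkv
        rcases List.mem_cons.mp hkv with h1 | h2
        · rw [h1]; exact h
        · exact ih kv h2
      · simp only [pvRunLen, if_neg h, List.take_zero]
        simp

theorem pvDrop_head (r : Char) (rest : List (String × List (String × String))) :
    ∀ kv, (rest.drop (pvRunLen r rest)).head? = some kv → PySem.Str.pyGet? kv.1 0 ≠ some r := by
  induction rest with
  | nil => simp [pvRunLen]
  | cons kv' rest' ih =>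
      by_cases h : PySem.Str.pyGet? kv'.1 0 = some r
      · simpa only [pvRunLen, if_pos h, List.drop_succ_cons] using ih
      · intro kv hkv
        simp only [pvRunLen, if_neg h, List.drop_zero, List.head?_cons, Option.some.injEq] at hkv
        rw [← hkv]; exact h

theorem pvRows_ne_nil (kv : String × List (String × String)) (rest : List (String × List (String × String))) :
    pvRows (kv :: rest) ≠ "" := by
  rw [pvRows]
  split <;> (intro he; rw [String.ext_iff] at he; simp at he)

theorem pvRun_absorb (run : List (String × List (String × String))) (c : String)
    (h : ∀ kv ∈ run, pvRowOf kv.1 = c) : ∀ out : String,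
    run.foldl pvStepA (out, c) =
      (out ++ PySem.Str.join "" (run.map (fun kd => pvStatusSym kd.2 ++ "  ")), c) := by
  induction run with
  | nil => intro out; simp [PySem.Str.join, PySem.Chars.join_nil]
  | cons kv rest ih =>
      intro out
      have hrow : pvRowOf kv.1 = c := h kv (List.mem_cons_self ..)
      have hstep : pvStepA (out, c) kv = (out ++ pvStatusSym kv.2 ++ "  ", c) := by
        simp [pvStepA, hrow]
      rw [List.foldl_cons, hstep, ih (fun kv hkv => h kv (List.mem_cons_of_mem _ hkv)), List.map_cons, pvJoinE]
      simp [String.append_assoc]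

theorem pvMain : ∀ (N : Nat) (items : List (String × List (String × String))), items.length ≤ N →
    (∀ kv ∈ items, kv.1 ≠ "") → ∀ (out c : String),
    (∀ kv, items.head? = some kv → pvRowOf kv.1 ≠ c) →
    (items.foldl pvStepA (out, c)).1 =
      out ++ (if items.isEmpty then "" else (if c = "" then "" else "\n") ++ pvRows items) := by
  intro N
  induction N with
  | zero =>
      intro items hlen _ out c _
      have : items = [] := List.length_eq_zero_iff.mp (Nat.le_zero.mp hlen)
      subst this; simp
  | succ N ih =>
      intro items hlen hkeys out c hbd
      cases items with
      | nil => simp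
      | cons kv rest =>
        obtain ⟨a, l, hl⟩ : ∃ a l, kv.1.toList = a :: l := by
          cases h' : kv.1.toList with
          | nil =>
              exact absurd (by rw [String.ext_iff, h']; rfl) (hkeys kv (List.mem_cons_self ..))
          | cons a l => exact ⟨a, l, rfl⟩
        have hg : PySem.Str.pyGet? kv.1 0 = some a := by rw [pvGet0, hl]; rfl
        have hrow : pvRowOf kv.1 = String.ofList [a] := pvRowOf_eq _ _ hg
        have hrowne : pvRowOf kv.1 ≠ c := hbd kv rfl
        have hrowne' : String.ofList [a] ≠ "" := by
          intro he; rw [String.ext_iff] at he; simp at he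
        have hstep : pvStepA (out, c) kv =
            ((if c ≠ "" then out ++ "\n" else out) ++ String.ofList [a] ++ "  " ++ pvStatusSym kv.2 ++ "  ",
              String.ofList [a]) := by
          have hne2 : ¬(String.ofList [a] = c) := by rw [← hrow]; exact hrowne
          simp [pvStepA, hrow, hne2]
        have habs := pvRun_absorb (rest.take (pvRunLen a rest)) (String.ofList [a])
          (fun kv' hkv' => (pvRowOf_eq _ _ (pvTake_run a rest kv' hkv')))
        have hih := ih (rest.drop (pvRunLen a rest))
          (by rw [List.length_drop]; simp only [List.length_cons] at hlen; omega)
          (fun kv' hkv' => hkeys kv' (List.mem_cons_of_mem _ (List.mem_of_mem_drop hkv')))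
        rw [List.foldl_cons, hstep, ← List.take_append_drop (pvRunLen a rest) rest, List.foldl_append,
          habs, List.take_append_drop]
        rw [hih _ (String.ofList [a])
          (fun kv' hkv' => pvRowOf_ne _ _ (pvDrop_head a rest kv' hkv'))]
        rw [pvRows]
        simp only [hg, Option.getD_some, List.take_succ_cons, List.map_cons, pvJoinE,
          List.isEmpty_cons, if_neg hrowne']
        cases hrest2 : rest.drop (pvRunLen a rest) with
        | nil =>
            simp only [List.isEmpty_nil, pvRows]
            by_cases hc : c = "" <;>
              simp [hc, String.append_assoc]
        | cons kv2 rest2 =>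
            simp only [List.isEmpty_cons, if_neg (pvRows_ne_nil kv2 rest2), Bool.false_eq_true]
            by_cases hc : c = "" <;>
              simp [hc, String.append_assoc]

-- ===== VERDICT (by name: the statement is the Claim_ definition above) =====
theorem render_seat_map_spec : Claim_equal_render_seat_map := by
  intro sm _ hpre
  unfold Spec_render_seat_map render_seat_map render_seat_map_alt
  have hkeys : ∀ kv ∈ sm, kv.1 ≠ "" := fun kv h => (hpre.1 kv h).1
  have hbd : ∀ kv, sm.head? = some kv → pvRowOf kv.1 ≠ "" :=
    fun kv h => pvRowOf_ne_nil _ (hkeys kv (List.mem_of_mem_head? h))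
  rw [pvMain sm.length sm le_rfl hkeys pvHeader "" hbd]
  cases sm with
  | nil => simp [pvRows]
  | cons kv rest => simp [String.append_assoc]
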